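-- pv_equiv track=rewrite | github.com/RavioliSauce/ssh-config | src/sshconfig.py | parse
-- ===== SOURCE A (Python) =====
-- def parse(config: str) -> dict:
--     """Parse the SSH config file and populate the list widget"""
--     hosts = {}
--     current_host = None
--     lines = config.splitlines()
--     for line in lines:
--         line = line.strip()
--         if line.startswith("#") or not line:
--             continue
--         if line.startswith("Host "):
--             current_host = line.split()[1]
--             hosts[current_host] = {}
--         elif current_host:
--             key, value = line.split(None, 1)
--             hosts[current_host][key] = value
--     return hosts
-- ===== SOURCE B (Python) =====
-- def parse(config: str) -> dict:
--     """Parse the SSH config file and populate the list widget"""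
--     lines = [ln.strip() for ln in config.splitlines()]
--     lines = [ln for ln in lines if ln and not ln.startswith("#")]
--     i = 0
--     while i < len(lines) and not lines[i].startswith("Host "):
--         i += 1  # lines before the first Host header are discarded
--     hosts = {}
--     while i < len(lines):
--         name = lines[i].split()[1]
--         i += 1
--         body = {}
--         while i < len(lines) and not lines[i].startswith("Host "):
--             key, value = lines[i].split(None, 1)
--             body[key] = value
--             i += 1
--         hosts[name] = body
--     return hosts
-- ===== Notes on version B (the rewrite author's own statement) =====
-- stated objective: alternative
-- what changed: Replaces A's interleaved state-machine scan (current_host state, writing into hosts[current_host] line by line) with a group-then-parse decomposition: strip/filter all lines once, skip the pre-header preamble, then cut the remaining lines into Host-headed blocks and build each block's dict locally before installing it.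
import Mathlib
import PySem

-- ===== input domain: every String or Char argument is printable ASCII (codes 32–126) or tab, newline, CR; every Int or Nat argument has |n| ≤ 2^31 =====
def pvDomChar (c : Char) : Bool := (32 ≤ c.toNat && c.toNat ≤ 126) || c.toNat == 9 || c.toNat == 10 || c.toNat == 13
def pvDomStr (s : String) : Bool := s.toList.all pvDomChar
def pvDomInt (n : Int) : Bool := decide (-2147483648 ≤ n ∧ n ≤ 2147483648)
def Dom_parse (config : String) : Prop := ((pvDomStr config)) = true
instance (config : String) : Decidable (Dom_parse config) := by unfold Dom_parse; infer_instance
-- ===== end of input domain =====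

-- B parses by grouping: filter the stripped lines once, drop the preamble, cut into Host-headed
-- blocks and build each block's dict locally — instead of A's current_host state machine ('alternative').

-- ===== PORT A =====
def aStep (st : PySem.Dict String (PySem.Dict String String) × Option String) (rawLine : String) :
    PySem.Dict String (PySem.Dict String String) × Option String :=
  let line := PySem.Str.strip rawLine
  if PySem.Str.startswith line "#" || line == "" then st
  else if PySem.Str.startswith line "Host " then
    match PySem.List.pyGet? (PySem.Str.split₀ line) 1 with
    | some name => (st.1.insert name PySem.Dict.empty, some name)
    | none => st      -- Python would raise IndexError; unreachable: a stripped header line has a 2nd token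
  else match st.2 with
    | none => st      -- `elif current_host:` with current_host = None
    | some h =>
      if h == "" then st   -- `elif current_host:` with an empty name; unreachable (names are nonempty)
      else match PySem.Str.split₀Max line 1 with
        | [k, v] => (st.1.modify h PySem.Dict.empty (fun m => m.insert k v), st.2)
        | _ => st     -- Python raises ValueError on a 1-token body line; excluded by Pre_parse

def parse (config : String) : List (String × List (String × String)) :=
  let fin := (PySem.Str.splitlines config).foldl aStep (PySem.Dict.empty, none)
  fin.1.items.map (fun p => (p.1, p.2.items))

-- ===== PORT B =====
def altClean (config : String) : List String :=
  ((PySem.Str.splitlines config).map PySem.Str.strip).filter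
    (fun ln => !(ln == "") && !(PySem.Str.startswith ln "#"))

def altIsHeader (ln : String) : Bool := PySem.Str.startswith ln "Host "

-- inner while loop: consume body lines into `body` until the next Host header; returns the rest
def altBody : List String → PySem.Dict String String → PySem.Dict String String × List String
  | [], body => (body, [])
  | ln :: rest, body =>
    if altIsHeader ln then (body, ln :: rest)
    else match PySem.Str.split₀Max ln 1 with
      | [k, v] => altBody rest (body.insert k v)
      | _ => altBody rest body   -- Python raises ValueError here; excluded by Pre_parse

theorem altBody_rest_le : ∀ (ls : List String) (b : PySem.Dict String String),
    (altBody ls b).2.length ≤ ls.length := by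
  intro ls
  induction ls with
  | nil => intro b; simp [altBody]
  | cons ln rest ih =>
    intro b
    simp only [altBody]
    split
    · simp
    · split
      · exact le_trans (ih _) (Nat.le_succ _)
      · exact le_trans (ih _) (Nat.le_succ _)

-- outer while loop: one Host block per iteration
def altBlocks : List String → PySem.Dict String (PySem.Dict String String) →
    PySem.Dict String (PySem.Dict String String)
  | [], hosts => hosts
  | ln :: rest, hosts =>
    match PySem.List.pyGet? (PySem.Str.split₀ ln) 1 with
    | some name => altBlocks (altBody rest PySem.Dict.empty).2 (hosts.insert name (altBody rest PySem.Dict.empty).1)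
    | none => hosts   -- Python would raise IndexError; unreachable (headers have a 2nd token)
termination_by ls _ => ls.length
decreasing_by exact Nat.lt_succ_of_le (altBody_rest_le _ _)

def parse_alt (config : String) : List (String × List (String × String)) :=
  let ls := (altClean config).dropWhile (fun ln => !altIsHeader ln)
  (altBlocks ls PySem.Dict.empty).items.map (fun p => (p.1, p.2.items))

-- ===== PRECONDITION & SPEC =====
def preLines (config : String) : List String :=
  ((PySem.Str.splitlines config).map PySem.Str.strip).filter
    (fun ln => !(ln == "") && !(PySem.Str.startswith ln "#"))

-- Pre_parse excludes exactly the configs on which Python A raises ValueError: a stripped,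
-- non-comment, non-header line with no whitespace (a single token) occurring after a Host header.
def Pre_parse (config : String) : Prop :=
  (preLines config).Pairwise (fun a b => PySem.Str.startswith a "Host " = true →
    PySem.Str.startswith b "Host " = false → (PySem.Str.split₀Max b 1).length = 2)
instance (config : String) : Decidable (Pre_parse config) := by unfold Pre_parse; infer_instance

def pvWitness_parse : String := "Host a\nUser b\n# c\nHost a x\nPort 22"

def Spec_parse (config : String) (out : List (String × List (String × String))) : Prop := out = parse_alt config
instance (config : String) (out : List (String × List (String × String))) : Decidable (Spec_parse config out) := by unfold Spec_parse; infer_instance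

-- ===== CLAIM (what is proved, stated in full; the proofs are below) =====
def Claim_equal_parse : Prop := ∀ (config : String), Dom_parse config → Pre_parse config → Spec_parse config (parse config)

-- ===== LEMMAS AND PROOFS =====

-- the state-machine step on an already stripped, kept line
def stepC (st : PySem.Dict String (PySem.Dict String String) × Option String) (line : String) :
    PySem.Dict String (PySem.Dict String String) × Option String :=
  if PySem.Str.startswith line "Host " then
    match PySem.List.pyGet? (PySem.Str.split₀ line) 1 with
    | some name => (st.1.insert name PySem.Dict.empty, some name)
    | none => st
  else match st.2 with
    | none => st
    | some h =>
      if h == "" then st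
      else match PySem.Str.split₀Max line 1 with
        | [k, v] => (st.1.modify h PySem.Dict.empty (fun m => m.insert k v), st.2)
        | _ => st

theorem aStep_eq (st : PySem.Dict String (PySem.Dict String String) × Option String) (raw : String) :
    aStep st raw =
      if (!(PySem.Str.strip raw == "") && !(PySem.Str.startswith (PySem.Str.strip raw) "#")) then
        stepC st (PySem.Str.strip raw)
      else st := by
  cases h1 : (PySem.Str.startswith (PySem.Str.strip raw) "#") <;>
  cases h2 : (PySem.Str.strip raw == "") <;>
    simp only [aStep, stepC, h1, h2, Bool.or_true, Bool.or_false, Bool.true_or, Bool.false_or,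
      Bool.not_true, Bool.not_false, Bool.and_true, Bool.and_false, Bool.true_and, Bool.false_and,
      if_true, if_false, ite_true, ite_false, Bool.false_eq_true, reduceIte]

theorem foldl_aStep_eq (lines : List String) (st : PySem.Dict String (PySem.Dict String String) × Option String) :
    lines.foldl aStep st =
      ((lines.map PySem.Str.strip).filter (fun ln => !(ln == "") && !(PySem.Str.startswith ln "#"))).foldl stepC st := by
  induction lines generalizing st with
  | nil => rfl
  | cons raw rest ih =>
    simp only [List.foldl_cons, List.map_cons, List.filter_cons]
    rw [aStep_eq]
    cases hk : (!(PySem.Str.strip raw == "") && !(PySem.Str.startswith (PySem.Str.strip raw) "#"))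
    · simp only [Bool.false_eq_true, if_false, ite_false, reduceIte]
      exact ih st
    · simp only [if_true, ite_true, reduceIte, List.foldl_cons]
      exact ih _

-- skipping lines before the first header
theorem foldl_stepC_none (ls : List String) (d : PySem.Dict String (PySem.Dict String String)) :
    ls.foldl stepC (d, none) = (ls.dropWhile (fun ln => !altIsHeader ln)).foldl stepC (d, none) := by
  induction ls with
  | nil => rfl
  | cons ln rest ih =>
    by_cases hh : altIsHeader ln
    · simp [List.dropWhile_cons, hh]
    · have hstep : stepC (d, none) ln = (d, none) := by
        simp only [stepC]
        rw [if_neg]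
        simp only [altIsHeader] at hh
        simpa using hh
      simp only [List.foldl_cons, List.dropWhile_cons, hstep]
      simp only [hh, Bool.not_false, if_pos]
      exact ih

-- helper: the first element of a dropWhile result fails the predicate
theorem dropWhile_cons_head {α : Type} (p : α → Bool) (l : List α) (h : α) (t : List α)
    (he : List.dropWhile p l = h :: t) : p h = false := by
  induction l with
  | nil => simp at he
  | cons a l ih =>
    rw [List.dropWhile_cons] at he
    by_cases hp : p a = true
    · simp only [hp, if_true, reduceIte] at he; exact ih he
    · have hp' : p a = false := by simpa using hp
      simp only [hp', Bool.false_eq_true, if_false, reduceIte] at he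
      injection he with e1 e2
      rw [← e1]; exact hp' 

-- accumulator laws for Python's whitespace split
theorem goA (s : List Char) : ∀ (cur : List Char) (acc : List (List Char)),
    PySem.Chars.split₀.go s cur acc = acc.reverse ++ PySem.Chars.split₀.go s cur [] := by
  induction s with
  | nil =>
    intro cur acc
    simp only [PySem.Chars.split₀.go]
    by_cases h : cur.isEmpty = true <;> simp [h]
  | cons c rest ih =>
    intro cur acc
    simp only [PySem.Chars.split₀.go]
    by_cases hsp : PySem.Chars.isspace c = true
    · by_cases hc : cur.isEmpty = true
      · simp only [hsp, hc, if_true, reduceIte]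
        exact ih [] acc
      · simp only [hsp, hc, Bool.false_eq_true, if_false, if_true, reduceIte]
        rw [ih [] (cur.reverse :: acc), ih [] [cur.reverse]]
        simp
    · have hsp' : PySem.Chars.isspace c = false := by simpa using hsp
      simp only [hsp', Bool.false_eq_true, if_false, reduceIte]
      exact ih (c :: cur) acc

theorem goNe (s : List Char) : ∀ (cur : List Char) (acc : List (List Char)),
    cur ≠ [] → PySem.Chars.split₀.go s cur acc ≠ [] := by
  induction s with
  | nil =>
    intro cur acc hc
    simp only [PySem.Chars.split₀.go]
    have : cur.isEmpty = false := by simpa using hc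
    simp [this]
  | cons c rest ih =>
    intro cur acc hc
    simp only [PySem.Chars.split₀.go]
    by_cases hsp : PySem.Chars.isspace c = true
    · have : cur.isEmpty = false := by simpa using hc
      simp only [hsp, this, Bool.false_eq_true, if_false, if_true, reduceIte]
      rw [goA]
      simp
    · have hsp' : PySem.Chars.isspace c = false := by simpa using hsp
      simp only [hsp', Bool.false_eq_true, if_false, reduceIte]
      exact ih (c :: cur) acc (by simp)

theorem goHasWord (s : List Char) : ∀ (cur : List Char) (acc : List (List Char)),
    (∃ c ∈ s, PySem.Chars.isspace c = false) → PySem.Chars.split₀.go s cur acc ≠ [] := by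
  induction s with
  | nil => intro cur acc h; obtain ⟨c, hc, _⟩ := h; simp at hc
  | cons c rest ih =>
    intro cur acc h
    simp only [PySem.Chars.split₀.go]
    by_cases hsp : PySem.Chars.isspace c = true
    · by_cases hc : cur.isEmpty = true
      · simp only [hsp, hc, if_true, reduceIte]
        apply ih
        obtain ⟨c0, hc0, hns⟩ := h
        cases List.mem_cons.mp hc0 with
        | inl he => rw [he] at hns; rw [hns] at hsp; simp at hsp
        | inr hm => exact ⟨c0, hm, hns⟩
      · simp only [hsp, hc, Bool.false_eq_true, if_false, if_true, reduceIte]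
        rw [goA]; simp
    · have hsp' : PySem.Chars.isspace c = false := by simpa using hsp
      simp only [hsp', Bool.false_eq_true, if_false, reduceIte]
      exact goNe rest (c :: cur) acc (by simp)

theorem goWords (s : List Char) : ∀ (cur : List Char) (acc : List (List Char)),
    (∀ w ∈ acc, w ≠ []) → ∀ w ∈ PySem.Chars.split₀.go s cur acc, w ≠ [] := by
  induction s with
  | nil =>
    intro cur acc hacc w hw
    simp only [PySem.Chars.split₀.go] at hw
    by_cases hc : cur.isEmpty = true
    · simp only [hc, if_true, reduceIte] at hw
      exact hacc w (by simpa using hw)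
    · simp only [hc, Bool.false_eq_true, if_false, reduceIte] at hw
      rw [List.mem_reverse, List.mem_cons] at hw
      cases hw with
      | inl he => rw [he]; simp; intro h0; rw [h0] at hc; simp at hc
      | inr hm => exact hacc w hm
  | cons c rest ih =>
    intro cur acc hacc w hw
    simp only [PySem.Chars.split₀.go] at hw
    by_cases hsp : PySem.Chars.isspace c = true
    · by_cases hc : cur.isEmpty = true
      · simp only [hsp, hc, if_true, reduceIte] at hw
        exact ih [] acc hacc w hw
      · simp only [hsp, hc, Bool.false_eq_true, if_false, if_true, reduceIte] at hw
        refine ih [] (cur.reverse :: acc) ?_ w hw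
        intro w' hw'
        cases List.mem_cons.mp hw' with
        | inl he => rw [he]; simp; intro h0; rw [h0] at hc; simp at hc
        | inr hm => exact hacc w' hm
    · have hsp' : PySem.Chars.isspace c = false := by simpa using hsp
      simp only [hsp', Bool.false_eq_true, if_false, reduceIte] at hw
      exact ih (c :: cur) acc hacc w hw

-- a stripped line starting with "Host " has a nonempty second token
theorem header_name (ln : String) (hr : PySem.Chars.rstrip ln.toList = ln.toList)
    (hh : PySem.Str.startswith ln "Host " = true) :
    ∃ name, PySem.List.pyGet? (PySem.Str.split₀ ln) 1 = some name ∧ name ≠ "" := by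
  have hh2 : PySem.Chars.startswith ln.toList "Host ".toList = true := by
    simpa using hh
  obtain ⟨rest, hrest⟩ := (PySem.Chars.startswith_iff ln.toList "Host ".toList).mp hh2
  have hHost : "Host ".toList = ['H', 'o', 's', 't', ' '] := by decide
  rw [hHost] at hrest
  -- last character of ln is not whitespace
  have hrev : List.dropWhile PySem.Chars.isspace ln.toList.reverse = ln.toList.reverse := by
    have h1 := congrArg List.reverse hr
    unfold PySem.Chars.rstrip at h1
    rw [List.reverse_reverse] at h1
    exact h1
  have hrestne : rest ≠ [] := by
    intro h0
    rw [h0, List.append_nil] at hrest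
    rw [← hrest] at hrev
    have : PySem.Chars.isspace ' ' = true := by decide
    simp [this] at hrev
    exact absurd hrev (by decide)
  obtain ⟨c0, rr, hc0⟩ : ∃ c0 rr, rest.reverse = c0 :: rr := by
    cases hx : rest.reverse with
    | nil => exact absurd (by simpa using hx) hrestne
    | cons a l => exact ⟨a, l, rfl⟩
  have hc0mem : c0 ∈ rest := by
    rw [← List.mem_reverse, hc0]; simp
  have hns : PySem.Chars.isspace c0 = false := by
    apply dropWhile_cons_head PySem.Chars.isspace ln.toList.reverse c0 (rr ++ ['H', 'o', 's', 't', ' '].reverse)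
    rw [hrev, ← hrest]
    simp [hc0]
  -- compute split₀ on "Host " ++ rest
  have hH : PySem.Chars.isspace 'H' = false := by decide
  have ho : PySem.Chars.isspace 'o' = false := by decide
  have hs : PySem.Chars.isspace 's' = false := by decide
  have ht : PySem.Chars.isspace 't' = false := by decide
  have hspc : PySem.Chars.isspace ' ' = true := by decide
  have hsplit : PySem.Chars.split₀ ln.toList =
      ['H', 'o', 's', 't'] :: PySem.Chars.split₀.go rest [] [] := by
    rw [← hrest]
    show PySem.Chars.split₀.go (['H', 'o', 's', 't', ' '] ++ rest) [] [] = _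
    simp only [List.cons_append, List.nil_append, PySem.Chars.split₀.go, hH, ho, hs, ht, hspc,
      Bool.false_eq_true, if_false, if_true, reduceIte, List.isEmpty_cons, List.isEmpty_nil]
    rw [goA]
    simp
  obtain ⟨w, ws, hws⟩ : ∃ w ws, PySem.Chars.split₀.go rest [] [] = w :: ws := by
    cases hx : PySem.Chars.split₀.go rest [] [] with
    | nil => exact absurd hx (goHasWord rest [] [] ⟨c0, hc0mem, hns⟩)
    | cons a l => exact ⟨a, l, rfl⟩
  have hwne : w ≠ [] := goWords rest [] [] (by simp) w (by rw [hws]; simp)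
  refine ⟨String.ofList w, ?_, ?_⟩
  · simp only [PySem.Str.split₀, hsplit, hws, List.map_cons]
    simp [PySem.List.pyGet?, PySem.List.pyIdx?]
  · intro h0
    have := congrArg String.toList h0
    simp at this
    exact hwne this

-- main invariant: from a just-seen header with name n, A's fold equals B's block recursion
theorem main_inv (ls : List String) (d : PySem.Dict String (PySem.Dict String String))
    (n : String) (b : PySem.Dict String String) (hn : n ≠ "")
    (hok : ∀ ln ∈ ls, PySem.Str.startswith ln "Host " = false → (PySem.Str.split₀Max ln 1).length = 2)
    (hr : ∀ ln ∈ ls, PySem.Chars.rstrip ln.toList = ln.toList) :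
    (ls.foldl stepC (d.insert n b, some n)).1 =
      altBlocks (altBody ls b).2 (d.insert n (altBody ls b).1) := by
  induction ls generalizing d n b with
  | nil => simp [altBody, altBlocks]
  | cons ln rest ih =>
    by_cases hh : PySem.Str.startswith ln "Host " = true
    · obtain ⟨name, hg, hne⟩ := header_name ln (hr ln (by simp)) hh
      have lhs1 : stepC (d.insert n b, some n) ln =
          ((d.insert n b).insert name PySem.Dict.empty, some name) := by
        simp only [stepC, hh, if_true, reduceIte, hg]
      have hb : altBody (ln :: rest) b = (b, ln :: rest) := by
        simp only [altBody, altIsHeader, hh, if_true, reduceIte]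
      rw [hb, List.foldl_cons, lhs1, altBlocks, hg]
      exact ih (d.insert n b) name PySem.Dict.empty hne
        (fun l hl => hok l (by simp [hl])) (fun l hl => hr l (by simp [hl]))
    · have hh' : PySem.Str.startswith ln "Host " = false := by simpa using hh
      have h2 : (PySem.Str.split₀Max ln 1).length = 2 := hok ln (by simp) hh'
      obtain ⟨k, v, hkv⟩ : ∃ k v, PySem.Str.split₀Max ln 1 = [k, v] := by
        cases hx : PySem.Str.split₀Max ln 1 with
        | nil => rw [hx] at h2; simp at h2
        | cons a l =>
          cases l with
          | nil => rw [hx] at h2; simp at h2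
          | cons c l2 =>
            cases l2 with
            | nil => exact ⟨a, c, rfl⟩
            | cons e l3 => rw [hx] at h2; simp at h2
      have hnb : (n == "") = false := by simpa using hn
      have lhs1 : stepC (d.insert n b, some n) ln = (d.insert n (b.insert k v), some n) := by
        simp only [stepC, hh', Bool.false_eq_true, if_false, reduceIte, hnb, hkv,
          PySem.Dict.modify, PySem.Dict.getD_insert_self, PySem.Dict.insert_insert_self]
      have hb : altBody (ln :: rest) b = altBody rest (b.insert k v) := by
        simp only [altBody, altIsHeader, hh', hkv, Bool.false_eq_true, if_false, reduceIte]
      rw [hb, List.foldl_cons, lhs1]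
      exact ih d n (b.insert k v) hn
        (fun l hl => hok l (by simp [hl])) (fun l hl => hr l (by simp [hl]))

-- ===== VERDICT (by name: the statement is the Claim_ definition above) =====
-- every kept line is a stripped string, hence rstrip-invariant
theorem clean_rstrip (config : String) :
    ∀ ln ∈ altClean config, PySem.Chars.rstrip ln.toList = ln.toList := by
  intro ln hln
  have h1 := List.mem_filter.mp hln |>.1
  obtain ⟨raw, _, rfl⟩ := List.mem_map.mp h1
  simp only [PySem.Str.toList_strip, PySem.Chars.strip, PySem.Chars.rstrip, PySem.Chars.lstrip]
  rw [List.reverse_reverse, List.dropWhile_idempotent]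

theorem parse_spec : Claim_equal_parse := by
  unfold Claim_equal_parse
  intro config _ hpre
  unfold Spec_parse
  simp only [parse, parse_alt]
  rw [foldl_aStep_eq]
  have hclean : ((PySem.Str.splitlines config).map PySem.Str.strip).filter
      (fun ln => !(ln == "") && !(PySem.Str.startswith ln "#")) = altClean config := rfl
  rw [hclean, foldl_stepC_none]
  have hpc : (altClean config).Pairwise (fun a b => PySem.Str.startswith a "Host " = true →
      PySem.Str.startswith b "Host " = false → (PySem.Str.split₀Max b 1).length = 2) := hpre
  have hsub : ((altClean config).dropWhile (fun ln => !altIsHeader ln)).Sublist (altClean config) :=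
    (List.dropWhile_suffix _).sublist
  cases hcase : (altClean config).dropWhile (fun ln => !altIsHeader ln) with
  | nil => simp only [altBlocks]; rfl
  | cons h t =>
    rw [hcase] at hsub
    have hhead' : PySem.Str.startswith h "Host " = true := by
      have := dropWhile_cons_head (fun ln => !altIsHeader ln) _ _ _ hcase
      simpa [altIsHeader] using this
    have hmem : ∀ ln ∈ h :: t, ln ∈ altClean config := fun ln hl => hsub.subset hl
    have hr : ∀ ln ∈ h :: t, PySem.Chars.rstrip ln.toList = ln.toList :=
      fun ln hl => clean_rstrip config ln (hmem ln hl)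
    have hp2 := hpc.sublist hsub
    have hok : ∀ ln ∈ t, PySem.Str.startswith ln "Host " = false →
        (PySem.Str.split₀Max ln 1).length = 2 :=
      fun ln hl hnh => (List.pairwise_cons.mp hp2).1 ln hl hhead' hnh
    obtain ⟨name, hg, hne⟩ := header_name h (hr h (by simp)) hhead'
    have hstep : stepC (PySem.Dict.empty, none) h =
        (PySem.Dict.empty.insert name PySem.Dict.empty, some name) := by
      simp only [stepC, hhead', if_true, reduceIte, hg]
    rw [List.foldl_cons, hstep, altBlocks, hg]
    rw [main_inv t PySem.Dict.empty name PySem.Dict.empty hne hok (fun l hl => hr l (by simp [hl]))]
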